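-- pv_equiv track=rewrite | github.com/IvanRamyk/preferans-telegram-bot | bot.py | hand_to_string
-- ===== SOURCE A (Python) =====
-- def hash_to_sting(_hash):
--     answer = ''
--     if _hash // 4 <= 10:
--         answer += str(_hash // 4)
--     elif _hash // 4 == 11:
--         answer += 'J'
--     elif _hash // 4 == 12:
--         answer += 'Q'
--     elif _hash // 4 == 13:
--         answer += 'K'
--     elif _hash // 4 == 14:
--         answer += 'A'
--     if _hash % 4 == 0:
--         answer += '♠'
--     elif _hash % 4 == 1:
--         answer += '♣'
--     elif _hash % 4 == 2:
--         answer += '♦'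
--     elif _hash % 4 == 3:
--         answer += '♥'
--     return answer
--
-- def hand_to_string(hand):
--     answer = ''
--     last_suit = -1
--     for i in hand:
--         if last_suit != - 1 and last_suit != i % 4:
--             answer += '\n'
--         answer += hash_to_sting(i)
--         answer += ' '
--         last_suit = i % 4
--     return answer
-- ===== SOURCE B (Python) =====
-- def card_str(h):
--     r, s = h // 4, h % 4
--     if r <= 10:
--         rank = str(r)
--     elif r <= 14:
--         rank = 'JQKA'[r - 11]
--     else:
--         rank = ''
--     return rank + '♠♣♦♥'[s]
--
-- def hand_to_string(hand):
--     parts = []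
--     i = 0
--     n = len(hand)
--     while i < n:
--         suit = hand[i] % 4
--         j = i
--         while j < n and hand[j] % 4 == suit:
--             j += 1
--         parts.append(''.join(card_str(c) + ' ' for c in hand[i:j]))
--         i = j
--     return '\n'.join(parts)
-- ===== Notes on version B (the rewrite author's own statement) =====
-- stated objective: alternative
-- what changed: Replaces A's last_suit-transition accumulator loop with an explicit two-level grouping pass: split the hand into maximal runs of consecutive same-suit cards, render each run (per-card formatter uses divmod, a 'JQKA' rank table and a suit-string index instead of A's if/elif chains), and join the run strings with '\n'.
import Mathlib
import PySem

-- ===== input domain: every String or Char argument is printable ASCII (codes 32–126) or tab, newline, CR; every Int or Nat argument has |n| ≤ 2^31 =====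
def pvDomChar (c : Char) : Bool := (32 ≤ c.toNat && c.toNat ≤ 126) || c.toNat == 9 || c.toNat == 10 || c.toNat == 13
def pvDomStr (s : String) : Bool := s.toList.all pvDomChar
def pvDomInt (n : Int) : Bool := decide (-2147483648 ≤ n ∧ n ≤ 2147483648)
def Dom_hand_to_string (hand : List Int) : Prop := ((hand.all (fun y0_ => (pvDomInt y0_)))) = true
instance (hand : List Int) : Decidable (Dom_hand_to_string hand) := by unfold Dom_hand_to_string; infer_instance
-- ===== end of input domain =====

-- B replaces A's last_suit-transition accumulator by an explicit span-based grouping into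
-- same-suit runs that are rendered and joined with '\n' (objective: alternative decomposition).
-- Both ports build a List Char and wrap it with String.ofList at the end (String.append is opaque
-- to the kernel); this is exact: Python string concatenation is concatenation of the char lists.

-- ===== PORT A =====
-- hash_to_sting, char-list form (answer += … is list append; str(n) is PySem.Int.toChars)
def hashChars (h : Int) : List Char :=
  let answer : List Char := []
  let answer :=
    if PySem.Int.floordiv h 4 ≤ 10 then answer ++ PySem.Int.toChars (PySem.Int.floordiv h 4)
    else if PySem.Int.floordiv h 4 = 11 then answer ++ ['J']
    else if PySem.Int.floordiv h 4 = 12 then answer ++ ['Q']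
    else if PySem.Int.floordiv h 4 = 13 then answer ++ ['K']
    else if PySem.Int.floordiv h 4 = 14 then answer ++ ['A']
    else answer
  if PySem.Int.mod h 4 = 0 then answer ++ ['♠']
  else if PySem.Int.mod h 4 = 1 then answer ++ ['♣']
  else if PySem.Int.mod h 4 = 2 then answer ++ ['♦']
  else if PySem.Int.mod h 4 = 3 then answer ++ ['♥']
  else answer

-- one iteration of A's for-loop: state = (answer, last_suit)
def stepA (st : List Char × Int) (i : Int) : List Char × Int :=
  let answer := st.1
  let answer := if st.2 ≠ -1 ∧ st.2 ≠ PySem.Int.mod i 4 then answer ++ ['\n'] else answer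
  (answer ++ hashChars i ++ [' '], PySem.Int.mod i 4)

def hand_to_string (hand : List Int) : String :=
  String.ofList (hand.foldl stepA ([], -1)).1

-- ===== PORT B =====
-- card_str of Source B, char-list form
def cardChars (h : Int) : List Char :=
  let r := PySem.Int.floordiv h 4
  let s := PySem.Int.mod h 4
  let rank : List Char :=
    if r ≤ 10 then PySem.Int.toChars r
    else if r ≤ 14 then
      match PySem.List.pyGet? ['J', 'Q', 'K', 'A'] (r - 11) with
      | some c => [c]
      | none => []
    else []
  match PySem.List.pyGet? ['♠', '♣', '♦', '♥'] s with
  | some c => rank ++ [c]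
  | none => rank

-- outer while loop of Source B: split the hand into maximal same-suit runs, render each run
def altGroups : List Int → List (List Char)
  | [] => []
  | x :: xs =>
    let q := PySem.Int.mod x 4
    let grp := x :: xs.takeWhile (fun c => PySem.Int.mod c 4 == q)
    let rest := xs.dropWhile (fun c => PySem.Int.mod c 4 == q)
    (grp.foldl (fun s c => s ++ (cardChars c ++ [' '])) []) :: altGroups rest
  termination_by l => l.length
  decreasing_by
    simpa using Nat.lt_succ_of_le (List.length_dropWhile_le _ _)

-- '\n'.join(parts)
def joinNl : List (List Char) → List Char
  | [] => []
  | [a] => a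
  | a :: b :: t => a ++ '\n' :: joinNl (b :: t)

def hand_to_string_alt (hand : List Int) : String :=
  String.ofList (joinNl (altGroups hand))

-- ===== PRECONDITION & SPEC =====
def Spec_hand_to_string (hand : List Int) (out : String) : Prop := out = hand_to_string_alt hand
instance (hand : List Int) (out : String) : Decidable (Spec_hand_to_string hand out) := by unfold Spec_hand_to_string; infer_instance

-- ===== CLAIM (what is proved, stated in full; the proofs are below) =====
def Claim_equal_hand_to_string : Prop := ∀ (hand : List Int), Dom_hand_to_string hand → Spec_hand_to_string hand (hand_to_string hand)

-- ===== LEMMAS AND PROOFS =====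

-- the two per-card formatters agree
lemma card_eq (h : Int) : hashChars h = cardChars h := by
  unfold hashChars cardChars
  have h0 : (0:Int) < 4 := by norm_num
  have hnn := PySem.Int.mod_nonneg h h0
  have hlt := PySem.Int.mod_lt h h0
  have hr : PySem.Int.mod h 4 = 0 ∨ PySem.Int.mod h 4 = 1 ∨ PySem.Int.mod h 4 = 2 ∨
      PySem.Int.mod h 4 = 3 := by omega
  have hrank :
      (if PySem.Int.floordiv h 4 ≤ 10 then ([] : List Char) ++ PySem.Int.toChars (PySem.Int.floordiv h 4)
       else if PySem.Int.floordiv h 4 = 11 then [] ++ ['J']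
       else if PySem.Int.floordiv h 4 = 12 then [] ++ ['Q']
       else if PySem.Int.floordiv h 4 = 13 then [] ++ ['K']
       else if PySem.Int.floordiv h 4 = 14 then [] ++ ['A']
       else []) =
      (if PySem.Int.floordiv h 4 ≤ 10 then PySem.Int.toChars (PySem.Int.floordiv h 4)
       else if PySem.Int.floordiv h 4 ≤ 14 then
         match PySem.List.pyGet? ['J', 'Q', 'K', 'A'] (PySem.Int.floordiv h 4 - 11) with
         | some c => [c]
         | none => []
       else []) := by
    generalize PySem.Int.floordiv h 4 = q
    by_cases h10 : q ≤ 10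
    · simp [h10]
    · by_cases h11 : q = 11
      · subst h11; decide
      · by_cases h12 : q = 12
        · subst h12; decide
        · by_cases h13 : q = 13
          · subst h13; decide
          · by_cases h14 : q = 14
            · subst h14; decide
            · have h14' : ¬ q ≤ 14 := by omega
              simp [h10, h11, h12, h13, h14, h14']
  rcases hr with hr | hr | hr | hr <;> simp only [hr, hrank] <;> norm_num <;> try decide

-- the answer accumulator factors out of A's fold
lemma foldA_factor (l : List Int) : ∀ (a : List Char) (s : Int),
    l.foldl stepA (a, s) = (a ++ (l.foldl stepA ([], s)).1, (l.foldl stepA ([], s)).2) := by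
  induction l with
  | nil => intro a s; simp
  | cons x xs ih =>
    intro a s
    simp only [List.foldl_cons]
    rw [ih ((stepA (a, s) x).1) ((stepA (a, s) x).2),
        ih ((stepA ([], s) x).1) ((stepA ([], s) x).2)]
    have h1 : (stepA (a, s) x).1 = a ++ (stepA ([], s) x).1 := by
      simp only [stepA]
      split_ifs <;> simp
    have h2 : (stepA (a, s) x).2 = (stepA ([], s) x).2 := by simp [stepA]
    rw [h1, h2, List.append_assoc]

-- A's loop from a given last_suit
def fA (s : Int) (l : List Int) : List Char := (l.foldl stepA ([], s)).1

lemma fA_cons (s x : Int) (xs : List Int) :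
    fA s (x :: xs) =
      (if s ≠ -1 ∧ s ≠ PySem.Int.mod x 4 then ['\n'] else []) ++
        hashChars x ++ [' '] ++ fA (PySem.Int.mod x 4) xs := by
  unfold fA
  simp only [List.foldl_cons]
  have hstep : stepA ([], s) x =
      ((if s ≠ -1 ∧ s ≠ PySem.Int.mod x 4 then ['\n'] else []) ++ hashChars x ++ [' '],
        PySem.Int.mod x 4) := by
    simp only [stepA]
    split_ifs <;> simp
  rw [hstep, foldA_factor]

-- a run of cards whose suit equals the current last_suit produces no newline
lemma fA_run (t : List Int) : ∀ (rest : List Int) (q : Int),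
    (∀ c ∈ t, PySem.Int.mod c 4 = q) → 0 ≤ q →
    fA q (t ++ rest) = t.flatMap (fun c => hashChars c ++ [' ']) ++ fA q rest := by
  induction t with
  | nil => intro rest q _ _; simp
  | cons c t ih =>
    intro rest q hall hq
    have hc : PySem.Int.mod c 4 = q := hall c (by simp)
    have : fA q (c :: (t ++ rest)) =
        (if q ≠ -1 ∧ q ≠ PySem.Int.mod c 4 then ['\n'] else []) ++
          hashChars c ++ [' '] ++ fA (PySem.Int.mod c 4) (t ++ rest) := fA_cons _ _ _
    rw [List.cons_append, this, hc]
    have hfalse : ¬ (q ≠ -1 ∧ q ≠ q) := by simp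
    rw [if_neg hfalse, ih rest q (fun d hd => hall d (by simp [hd])) hq]
    simp [List.append_assoc]

-- the head of dropWhile fails the predicate
lemma dropWhile_head_false {α : Type} (p : α → Bool) (l : List α) (y : α) (ys : List α)
    (h : l.dropWhile p = y :: ys) : p y = false := by
  induction l with
  | nil => simp at h
  | cons a t ih =>
    by_cases hp : p a
    · rw [List.dropWhile_cons_of_pos hp] at h; exact ih h
    · rw [List.dropWhile_cons_of_neg hp] at h
      cases h; simpa using hp

lemma altGroups_cons (x : Int) (xs : List Int) :
    altGroups (x :: xs) =
      ((x :: xs.takeWhile (fun c => PySem.Int.mod c 4 == PySem.Int.mod x 4)).foldl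
          (fun s c => s ++ (cardChars c ++ [' '])) []) ::
        altGroups (xs.dropWhile (fun c => PySem.Int.mod c 4 == PySem.Int.mod x 4)) := by
  rw [altGroups]

-- main invariant: A's loop from last_suit s renders the grouped form, with a leading
-- newline exactly when s is a real suit differing from the head's suit
lemma main_inv : ∀ (n : Nat) (l : List Int), l.length ≤ n → ∀ (s : Int),
    (s = -1 ∨ (0 ≤ s ∧ ∀ y ∈ l.head?, PySem.Int.mod y 4 ≠ s)) →
    fA s l = (if l = [] then [] else if s = -1 then [] else ['\n']) ++ joinNl (altGroups l) := by
  intro n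
  induction n with
  | zero =>
    intro l hl s _
    have : l = [] := by cases l <;> simp_all
    subst this
    simp [fA, altGroups, joinNl]
  | succ n ih =>
    intro l hl s hs
    cases l with
    | nil => simp [fA, altGroups, joinNl]
    | cons x xs =>
      have hq0 : (0:Int) < 4 := by norm_num
      set q := PySem.Int.mod x 4 with hqdef
      have hqnn : 0 ≤ q := PySem.Int.mod_nonneg x hq0
      set p : Int → Bool := fun c => PySem.Int.mod c 4 == q with hp
      set t := xs.takeWhile p with ht
      set rest := xs.dropWhile p with hrest
      have hsplit : xs = t ++ rest := (List.takeWhile_append_dropWhile ..).symm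
      have htall : ∀ c ∈ t, PySem.Int.mod c 4 = q := by
        intro c hc
        have := List.mem_takeWhile_imp hc
        simpa [hp] using this
      -- A side: one step then the run
      have hA : fA s (x :: xs) =
          (if s ≠ -1 ∧ s ≠ q then ['\n'] else []) ++
            hashChars x ++ [' '] ++ (t.flatMap (fun c => hashChars c ++ [' ']) ++ fA q rest) := by
        rw [fA_cons, ← hqdef, hsplit, fA_run t rest q htall hqnn]
      -- the leading-newline condition matches
      have hpre : (if s ≠ -1 ∧ s ≠ q then (['\n'] : List Char) else []) =
          (if (x :: xs) = [] then [] else if s = -1 then [] else ['\n']) := by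
        rcases hs with hs | ⟨hs0, hshead⟩
        · simp [hs]
        · have hne : s ≠ -1 := by omega
          have : PySem.Int.mod x 4 ≠ s := hshead x (by simp)
          have hsq : s ≠ q := by rw [hqdef]; exact fun hh => this hh.symm
          simp [hne, hsq]
      -- B side run for this group
      have hrun : ((x :: t).foldl (fun s c => s ++ (cardChars c ++ [' '])) []) =
          hashChars x ++ [' '] ++ t.flatMap (fun c => hashChars c ++ [' ']) := by
        have hfun : (fun (c : Int) => cardChars c ++ ([' '] : List Char)) =
            fun c => hashChars c ++ [' '] := funext fun c => by rw [card_eq]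
        rw [PySem.List.foldl_append_eq_flatMap, hfun]
        simp [List.flatMap_cons, List.append_assoc]
      cases hrestc : rest with
      | nil =>
        have hxs : xs = t := by rw [hsplit, hrestc, List.append_nil]
        have : fA q ([] : List Int) = [] := by simp [fA]
        rw [hA, hrestc, this, List.append_nil, hpre]
        rw [altGroups_cons x xs, ← hqdef, ← hp, ← ht, ← hrest, hrestc]
        simp [altGroups, joinNl, hrun, List.append_assoc]
      | cons y ys =>
        have hylen : rest.length ≤ xs.length := by
          rw [hrest]; exact List.length_dropWhile_le _ _
        have hrlen : rest.length ≤ n := by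
          have : xs.length ≤ n := by simpa using hl
          omega
        have hyhead : ∀ z ∈ rest.head?, PySem.Int.mod z 4 ≠ q := by
          intro z hz
          rw [hrestc] at hz
          simp at hz
          subst hz
          have := dropWhile_head_false p xs y ys (by rw [← hrest, hrestc])
          simpa [hp] using this
        have hrec := ih rest hrlen q (Or.inr ⟨hqnn, hyhead⟩)
        have hqne : ¬ q = -1 := by omega
        rw [hrestc] at hrec
        have hrne : (y :: ys) ≠ [] := by simp
        rw [if_neg hrne, if_neg hqne] at hrec
        rw [hA, hrestc, hrec, hpre]
        rw [altGroups_cons x xs, ← hqdef, ← hp, ← ht, ← hrest, hrestc]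
        have hgne : altGroups (y :: ys) ≠ [] := by
          rw [altGroups_cons]; simp
        cases hg : altGroups (y :: ys) with
        | nil => exact absurd hg hgne
        | cons g gs =>
          simp [joinNl, hrun, List.append_assoc]

-- ===== VERDICT (by name: the statement is the Claim_ definition above) =====
theorem hand_to_string_spec : Claim_equal_hand_to_string := by
  intro hand _
  unfold Spec_hand_to_string hand_to_string hand_to_string_alt
  have h := main_inv hand.length hand (le_refl _) (-1) (Or.inl rfl)
  have : (hand.foldl stepA ([], -1)).1 = fA (-1) hand := rfl
  rw [this, h]
  simp
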